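-- pv_equiv track=rewrite | github.com/Kratospidey/corneal_ulcer | src/checkpoint_utils.py | _candidate_target_keys
-- ===== SOURCE A (Python) =====
-- from typing import Any
--
-- def _candidate_target_keys(source_key: str, model_state: dict[str, Any]) -> list[str]:
--     candidates: list[str] = [source_key]
--     if not source_key.startswith("backbone."):
--         candidates.append(f"backbone.{source_key}")
--     if source_key.startswith("backbone."):
--         candidates.append(source_key.removeprefix("backbone."))
--     if source_key.startswith("head.fc."):
--         candidates.append(f"classifier.{source_key.removeprefix('head.fc.')}")
--     if source_key.startswith("classifier."):
--         candidates.append(f"head.fc.{source_key.removeprefix('classifier.')}")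
--     if source_key.startswith("head.norm."):
--         suffix = source_key.removeprefix("head.norm.")
--         candidates.append(f"feature_norm.{suffix}")
--         candidates.append(f"backbone.head.norm.{suffix}")
--     if source_key.startswith("feature_norm."):
--         candidates.append(f"head.norm.{source_key.removeprefix('feature_norm.')}")
--     if source_key.startswith("backbone.head.norm."):
--         candidates.append(f"head.norm.{source_key.removeprefix('backbone.head.norm.')}")
--     ordered: list[str] = []
--     seen: set[str] = set()
--     for candidate in candidates:
--         if candidate in model_state and candidate not in seen:
--             ordered.append(candidate)
--             seen.add(candidate)
--     return ordered
-- ===== SOURCE B (Python) =====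
-- from typing import Any
--
--
-- def _rank(source_key: str, key: str) -> int | None:
--     """Position of `key` in the canonical candidate order for `source_key`,
--     or None if `key` is not a rewrite of `source_key`."""
--     for i, variant in enumerate(_variants(source_key)):
--         if variant == key:
--             return i
--     return None
--
--
-- def _variants(source_key: str):
--     yield source_key
--     if source_key.startswith("backbone."):
--         yield source_key[len("backbone."):]
--     else:
--         yield "backbone." + source_key
--     if source_key.startswith("head.fc."):
--         yield "classifier." + source_key[len("head.fc."):]
--     if source_key.startswith("classifier."):
--         yield "head.fc." + source_key[len("classifier."):]
--     if source_key.startswith("head.norm."):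
--         suffix = source_key[len("head.norm."):]
--         yield "feature_norm." + suffix
--         yield "backbone.head.norm." + suffix
--     if source_key.startswith("feature_norm."):
--         yield "head.norm." + source_key[len("feature_norm."):]
--     if source_key.startswith("backbone.head.norm."):
--         yield "head.norm." + source_key[len("backbone.head.norm."):]
--
--
-- def _candidate_target_keys(source_key: str, model_state: dict[str, Any]) -> list[str]:
--     # Scan the state dict once, classify each key by its rewrite rank,
--     # then order the matches by rank (distinct keys have distinct ranks).
--     matched = []
--     for key in model_state:
--         r = _rank(source_key, key)
--         if r is not None:
--             matched.append((r, key))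
--     matched.sort(key=lambda p: p[0])
--     return [key for _, key in matched]
-- ===== Notes on version B (the rewrite author's own statement) =====
-- stated objective: alternative
-- what changed: Inverts the traversal: instead of generating the candidate list and probing the dict with a seen-set dedup loop, B scans the state dict once, classifies each key by its rewrite rank (first matching variant index, None if no rule maps source_key to it), and sorts the matched keys by rank; distinct keys have distinct ranks, so this reproduces A's first-occurrence order exactly.
import Mathlib
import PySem

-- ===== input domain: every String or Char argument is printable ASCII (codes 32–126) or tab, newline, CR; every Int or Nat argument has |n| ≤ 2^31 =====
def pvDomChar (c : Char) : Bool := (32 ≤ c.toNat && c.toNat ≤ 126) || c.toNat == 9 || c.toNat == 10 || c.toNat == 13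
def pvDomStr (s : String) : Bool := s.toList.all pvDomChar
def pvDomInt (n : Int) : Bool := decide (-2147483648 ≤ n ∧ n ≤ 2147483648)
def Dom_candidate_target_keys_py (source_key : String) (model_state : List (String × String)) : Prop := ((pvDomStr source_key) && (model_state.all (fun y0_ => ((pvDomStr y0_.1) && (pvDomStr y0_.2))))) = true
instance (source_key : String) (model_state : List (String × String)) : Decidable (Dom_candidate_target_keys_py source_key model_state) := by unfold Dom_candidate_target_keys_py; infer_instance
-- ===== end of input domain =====

-- B inverts A's traversal: instead of generating candidates and probing the dict, it scans
-- the state dict once, classifies each key by its rewrite rank, and sorts the matches by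
-- rank (alternative decomposition; same result, similar cost).

-- ===== PORT A =====
-- s.removeprefix(p): exact (drops p's length when p is a prefix, else unchanged)
def pvRemoveprefix (s p : String) : String :=
  if PySem.Str.startswith s p then String.ofList (s.toList.drop p.toList.length) else s

-- A's conditional appends, written as appending the (possibly empty) block each branch adds
def candidate_target_keys_py (source_key : String) (model_state : List (String × String)) : List String :=
  let candidates : List String :=
    [source_key]
    ++ (if !(PySem.Str.startswith source_key "backbone.") then ["backbone." ++ source_key] else [])
    ++ (if PySem.Str.startswith source_key "backbone." then [pvRemoveprefix source_key "backbone."] else [])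
    ++ (if PySem.Str.startswith source_key "head.fc." then ["classifier." ++ pvRemoveprefix source_key "head.fc."] else [])
    ++ (if PySem.Str.startswith source_key "classifier." then ["head.fc." ++ pvRemoveprefix source_key "classifier."] else [])
    ++ (if PySem.Str.startswith source_key "head.norm." then
          ["feature_norm." ++ pvRemoveprefix source_key "head.norm.",
           "backbone.head.norm." ++ pvRemoveprefix source_key "head.norm."] else [])
    ++ (if PySem.Str.startswith source_key "feature_norm." then ["head.norm." ++ pvRemoveprefix source_key "feature_norm."] else [])
    ++ (if PySem.Str.startswith source_key "backbone.head.norm." then ["head.norm." ++ pvRemoveprefix source_key "backbone.head.norm."] else [])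
  (candidates.foldl
    (fun (acc : List String × PySem.Set String) c =>
      if (PySem.Dict.ofList model_state).contains c && !(PySem.Set.contains acc.2 c)
      then (acc.1 ++ [c], PySem.Set.add acc.2 c) else acc)
    ([], PySem.Set.empty)).1

-- ===== PORT B =====
-- s[len(p):] for the ASCII prefixes used here: exact
def pvStrip (s p : String) : String := String.ofList (s.toList.drop p.toList.length)

-- port of _variants: the rewrite variants of source_key in canonical order
def pvVariants (source_key : String) : List String :=
  [source_key]
  ++ (if PySem.Str.startswith source_key "backbone." then [pvStrip source_key "backbone."]
      else ["backbone." ++ source_key])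
  ++ (if PySem.Str.startswith source_key "head.fc." then ["classifier." ++ pvStrip source_key "head.fc."] else [])
  ++ (if PySem.Str.startswith source_key "classifier." then ["head.fc." ++ pvStrip source_key "classifier."] else [])
  ++ (if PySem.Str.startswith source_key "head.norm." then
        ["feature_norm." ++ pvStrip source_key "head.norm.",
         "backbone.head.norm." ++ pvStrip source_key "head.norm."] else [])
  ++ (if PySem.Str.startswith source_key "feature_norm." then ["head.norm." ++ pvStrip source_key "feature_norm."] else [])
  ++ (if PySem.Str.startswith source_key "backbone.head.norm." then ["head.norm." ++ pvStrip source_key "backbone.head.norm."] else [])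

-- port of _rank: the first enumerate index whose variant equals key, else None
def pvRank (source_key key : String) : Option Int :=
  (PySem.List.enumerate (pvVariants source_key)).findSome?
    (fun p => if p.2 == key then some p.1 else none)

def candidate_target_keys_py_alt (source_key : String) (model_state : List (String × String)) : List String :=
  let matched := ((PySem.Dict.ofList model_state).keys).foldl
    (fun (acc : List (Int × String)) key =>
      match pvRank source_key key with
      | some r => acc ++ [(r, key)]
      | none => acc) []
  (PySem.List.sorted matched (fun p => p.1) false).map (fun p => p.2)

-- ===== PRECONDITION & SPEC =====
def Spec_candidate_target_keys_py (source_key : String) (model_state : List (String × String)) (out : List String) : Prop := out = candidate_target_keys_py_alt source_key model_state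
instance (source_key : String) (model_state : List (String × String)) (out : List String) : Decidable (Spec_candidate_target_keys_py source_key model_state out) := by unfold Spec_candidate_target_keys_py; infer_instance

-- ===== CLAIM (what is proved, stated in full; the proofs are below) =====
def Claim_equal_candidate_target_keys_py : Prop := ∀ (source_key : String) (model_state : List (String × String)), Dom_candidate_target_keys_py source_key model_state → Spec_candidate_target_keys_py source_key model_state (candidate_target_keys_py source_key model_state)

-- ===== LEMMAS AND PROOFS =====

-- A's loop keeps ordered = seen (as lists): its result is Set.add folded over the members.
theorem pv_loop (mem : String → Bool) (cs : List String) (s : List String) :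
    (cs.foldl
      (fun (acc : List String × PySem.Set String) c =>
        if mem c && !(PySem.Set.contains acc.2 c)
        then (acc.1 ++ [c], PySem.Set.add acc.2 c) else acc)
      (s, s)).1
    = (cs.filter mem).foldl PySem.Set.add s := by
  induction cs generalizing s with
  | nil => simp
  | cons c cs ih =>
    by_cases hm : mem c
    · by_cases hc : c ∈ s
      · rw [List.foldl_cons, if_neg (by simp [hm, hc]), List.filter_cons_of_pos hm,
          List.foldl_cons]
        have hadd : PySem.Set.add s c = s := by simp [PySem.Set.add, hc]
        rw [hadd]; exact ih s
      · have hadd : PySem.Set.add s c = s ++ [c] := by simp [PySem.Set.add, hc]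
        rw [List.foldl_cons, if_pos (by simp [hm, hc]), List.filter_cons_of_pos hm,
          List.foldl_cons, hadd]
        exact ih (s ++ [c])
    · rw [List.foldl_cons, if_neg (by simp [hm]),
        List.filter_cons_of_neg (by simp [hm])]
      exact ih s

-- the two ports build the same variant list
theorem pv_cand_eq (source_key : String) :
    [source_key]
    ++ (if !(PySem.Str.startswith source_key "backbone.") then ["backbone." ++ source_key] else [])
    ++ (if PySem.Str.startswith source_key "backbone." then [pvRemoveprefix source_key "backbone."] else [])
    ++ (if PySem.Str.startswith source_key "head.fc." then ["classifier." ++ pvRemoveprefix source_key "head.fc."] else [])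
    ++ (if PySem.Str.startswith source_key "classifier." then ["head.fc." ++ pvRemoveprefix source_key "classifier."] else [])
    ++ (if PySem.Str.startswith source_key "head.norm." then
          ["feature_norm." ++ pvRemoveprefix source_key "head.norm.",
           "backbone.head.norm." ++ pvRemoveprefix source_key "head.norm."] else [])
    ++ (if PySem.Str.startswith source_key "feature_norm." then ["head.norm." ++ pvRemoveprefix source_key "feature_norm."] else [])
    ++ (if PySem.Str.startswith source_key "backbone.head.norm." then ["head.norm." ++ pvRemoveprefix source_key "backbone.head.norm."] else [])
    = pvVariants source_key := by
  unfold pvVariants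
  by_cases h1 : PySem.Str.startswith source_key "backbone." <;>
  by_cases h2 : PySem.Str.startswith source_key "head.fc." <;>
  by_cases h3 : PySem.Str.startswith source_key "classifier." <;>
  by_cases h4 : PySem.Str.startswith source_key "head.norm." <;>
  by_cases h5 : PySem.Str.startswith source_key "feature_norm." <;>
  by_cases h6 : PySem.Str.startswith source_key "backbone.head.norm." <;>
    simp only [h1, h2, h3, h4, h5, h6, pvRemoveprefix, pvStrip] <;> simp

-- the enumerate/findSome? loop computes 'first index of k', with any start
theorem pv_rank_aux (cs : List String) (s : Int) (k : String) :
    (PySem.List.enumerate cs s).findSome? (fun p => if p.2 == k then some p.1 else none)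
    = if k ∈ cs then some (s + (cs.idxOf k : Int)) else none := by
  induction cs generalizing s with
  | nil => simp [PySem.List.enumerate]
  | cons c cs ih =>
    rw [PySem.List.enumerate_cons, List.findSome?_cons]
    by_cases hc : c = k
    · subst hc; simp
    · have hne : (c == k) = false := by simp [hc]
      simp only [hne, Bool.false_eq_true, if_false]
      rw [ih (s + 1), List.idxOf_cons_ne _ hc]
      by_cases hm : k ∈ cs
      · have hmc : k ∈ c :: cs := List.mem_cons_of_mem _ hm
        rw [if_pos hm, if_pos hmc]
        simp only [Option.some.injEq]
        push_cast
        omega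
      · have hkc : ¬ k ∈ c :: cs := by
          intro h
          rcases List.mem_cons.mp h with h | h
          · exact hc h.symm
          · exact hm h
        rw [if_neg hm, if_neg hkc]

-- folding Set.add from an arbitrary accumulator appends the unseen part
theorem pv_ofList_acc (t acc : List String) :
    t.foldl PySem.Set.add acc
    = acc ++ (PySem.Set.ofList t).filter (fun z => !(acc.contains z)) := by
  induction t generalizing acc with
  | nil => simp [PySem.Set.ofList_eq_foldl]
  | cons y t ih =>
    have hsing : PySem.Set.ofList (y :: t)
        = y :: (PySem.Set.ofList t).filter (fun z => !(z == y)) := by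
      rw [PySem.Set.ofList_eq_foldl, List.foldl_cons]
      have : PySem.Set.add ([] : List String) y = [y] := by simp [PySem.Set.add]
      rw [this, ih [y]]
      simp only [List.singleton_append, List.cons.injEq, true_and]
      apply List.filter_congr
      intro a _
      by_cases h : a = y
      · subst h; simp
      · simp [h]
    rw [List.foldl_cons, hsing]
    by_cases hy : y ∈ acc
    · have hadd : PySem.Set.add acc y = acc := by simp [PySem.Set.add, hy]
      rw [hadd, ih acc]
      have hyc : acc.contains y = true := by simpa using hy
      simp only [List.filter_cons, hyc, Bool.not_true, List.filter_filter]
      congr 1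
      apply List.filter_congr
      intro a _
      by_cases ha : a = y
      · subst ha; simp [hy]
      · simp [ha]
    · have hadd : PySem.Set.add acc y = acc ++ [y] := by simp [PySem.Set.add, hy]
      rw [hadd, ih (acc ++ [y])]
      have hyc : acc.contains y = false := by simpa using hy
      simp only [List.filter_cons, hyc, Bool.not_false, List.filter_filter,
        List.append_assoc, List.singleton_append]
      congr 2
      apply List.filter_congr
      intro a _
      by_cases ha : a = y
      · subst ha; simp
      · simp [ha]

-- dedup keeps first occurrences: ofList (x :: t) = x :: (ofList t minus x)
theorem pv_dedup_cons (x : String) (t : List String) :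
    PySem.Set.ofList (x :: t) = x :: (PySem.Set.ofList t).filter (fun z => !(z == x)) := by
  rw [PySem.Set.ofList_eq_foldl, List.foldl_cons]
  have : PySem.Set.add ([] : List String) x = [x] := by simp [PySem.Set.add]
  rw [this, pv_ofList_acc t [x]]
  simp only [List.singleton_append, List.cons.injEq, true_and]
  apply List.filter_congr
  intro a _
  by_cases h : a = x
  · subst h; simp
  · simp [h]

-- the dedup'd list is strictly increasing in first-occurrence index
theorem pv_dedup_pairwise (l : List String) :
    (PySem.Set.ofList l).Pairwise (fun a b => l.idxOf a < l.idxOf b) := by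
  induction l with
  | nil => simp [PySem.Set.ofList_eq_foldl]
  | cons x t ih =>
    rw [pv_dedup_cons]
    constructor
    · intro b hb
      have hbne : b ≠ x := by
        rcases List.mem_filter.mp hb with ⟨_, h2⟩
        simpa using h2
      rw [List.idxOf_cons_self, List.idxOf_cons_ne _ (fun h => hbne h.symm)]
      omega
    · have hpf : ((PySem.Set.ofList t).filter (fun z => !(z == x))).Pairwise
          (fun a b => t.idxOf a < t.idxOf b) := List.Pairwise.filter _ ih
      refine List.Pairwise.imp_of_mem ?_ hpf
      intro a b ha hb hab
      have hane : a ≠ x := by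
        rcases List.mem_filter.mp ha with ⟨_, h2⟩; simpa using h2
      have hbne : b ≠ x := by
        rcases List.mem_filter.mp hb with ⟨_, h2⟩; simpa using h2
      rw [List.idxOf_cons_ne _ (fun h => hane h.symm),
        List.idxOf_cons_ne _ (fun h => hbne h.symm)]
      omega

-- dedup commutes with an element-wise filter
theorem pv_ofList_filter (q : String → Bool) (l : List String) :
    PySem.Set.ofList (l.filter q) = (PySem.Set.ofList l).filter q := by
  induction l with
  | nil => simp [PySem.Set.ofList_eq_foldl]
  | cons x t ih =>
    by_cases hq : q x
    · rw [List.filter_cons_of_pos hq, pv_dedup_cons, pv_dedup_cons, ih,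
        List.filter_cons_of_pos hq, List.filter_filter, List.filter_filter]
      congr 1
      apply List.filter_congr
      intro a _
      by_cases ha : a = x <;> simp [ha, Bool.and_comm]
    · rw [List.filter_cons_of_neg (by simpa using hq), pv_dedup_cons, ih,
        List.filter_cons_of_neg (by simpa using hq), List.filter_filter]
      apply List.filter_congr
      intro a _
      by_cases ha : a = x
      · subst ha; simp [hq]
      · simp [ha]

-- B's scan loop collects (rank, key) for the keys that have a rank
theorem pv_matched_eq (sk : String) (K : List String) (acc : List (Int × String)) :
    K.foldl
      (fun (acc : List (Int × String)) key =>
        match pvRank sk key with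
        | some r => acc ++ [(r, key)]
        | none => acc) acc
    = acc ++ (K.filter (fun k => (pvRank sk k).isSome)).map
        (fun k => ((pvRank sk k).getD 0, k)) := by
  induction K generalizing acc with
  | nil => simp
  | cons k K ih =>
    rw [List.foldl_cons]
    cases h : pvRank sk k with
    | some r =>
      rw [List.filter_cons_of_pos (by simp [h])]
      simp only [h, List.map_cons, Option.getD_some]
      rw [ih]
      simp
    | none =>
      rw [List.filter_cons_of_neg (by simp [h])]
      exact ih acc

-- ===== VERDICT (by name: the statement is the Claim_ definition above) =====
theorem candidate_target_keys_py_spec : Claim_equal_candidate_target_keys_py := by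
  intro sk ms _
  show candidate_target_keys_py sk ms = _
  unfold candidate_target_keys_py candidate_target_keys_py_alt
  dsimp only
  rw [show (PySem.Set.empty : PySem.Set String) = ([] : List String) from rfl, pv_loop,
    pv_cand_eq, ← PySem.Set.ofList_eq_foldl, pv_matched_eq, List.nil_append]
  set d := PySem.Dict.ofList ms with hd
  set C := pvVariants sk with hC
  set mem : String → Bool := fun c => d.contains c with hmem
  -- A's value, rewritten to a filter of the dedup'd variant list
  rw [pv_ofList_filter mem C]
  set zs := (PySem.Set.ofList C).filter mem with hzs
  have hrank : ∀ k, pvRank sk k = if k ∈ C then some ((C.idxOf k : Int)) else none := by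
    intro k
    have := pv_rank_aux C 0 k
    simpa [pvRank, hC] using this
  -- membership facts
  have hzmem : ∀ x, x ∈ zs ↔ x ∈ C ∧ x ∈ d.keys := by
    intro x
    rw [hzs, List.mem_filter, PySem.Set.mem_ofList]
    constructor
    · rintro ⟨h1, h2⟩; exact ⟨h1, (PySem.Dict.contains_iff_mem_keys d x).mp h2⟩
    · rintro ⟨h1, h2⟩; exact ⟨h1, (PySem.Dict.contains_iff_mem_keys d x).mpr h2⟩
  -- the permutation
  have hperm : (zs.map (fun k => ((pvRank sk k).getD 0, k))).Perm
      ((d.keys.filter (fun k => (pvRank sk k).isSome)).map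
        (fun k => ((pvRank sk k).getD 0, k))) := by
    apply List.Perm.map
    apply (List.perm_ext_iff_of_nodup ?_ ?_).mpr
    · intro x
      rw [hzmem x, List.mem_filter]
      constructor
      · rintro ⟨h1, h2⟩; exact ⟨h2, by simp [hrank x, h1]⟩
      · rintro ⟨h1, h2⟩
        refine ⟨?_, h1⟩
        by_contra hx
        simp [hrank x, hx] at h2
    · exact List.Nodup.filter _ (PySem.Set.nodup_ofList C)
    · exact List.Nodup.filter _ (PySem.Dict.nodup_keys_ofList ms)
  -- strictly increasing ranks along zs
  have hpair : (zs.map (fun k => ((pvRank sk k).getD 0, k))).Pairwise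
      (fun a b => a.1 < b.1) := by
    rw [List.pairwise_map]
    have h0 : zs.Pairwise (fun a b => C.idxOf a < C.idxOf b) :=
      List.Pairwise.filter _ (pv_dedup_pairwise C)
    refine List.Pairwise.imp_of_mem ?_ h0
    intro a b ha hb hab
    have haC : a ∈ C := ((hzmem a).mp ha).1
    have hbC : b ∈ C := ((hzmem b).mp hb).1
    simp only [hrank a, hrank b, haC, hbC, if_pos, Option.getD_some]
    exact_mod_cast hab
  rw [PySem.List.sorted_eq_of_perm_of_pairwise_lt _ _ _ hperm hpair,
    List.map_map]
  exact (List.map_id zs).symm
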